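-- pv_equiv track=rewrite | github.com/malon43/adventofcode2023 | Day14/1.py | count_load_line
-- ===== SOURCE A (Python) =====
-- def count_load_line(line):
--     total_load = 0
--     pos = 0
--     for i, x in enumerate(line):
--         if x == 'O':
--             total_load += len(line) - pos
--             pos += 1
--         elif x == '#':
--             pos = i + 1
--     return total_load
-- ===== SOURCE B (Python) =====
-- def count_load_line(line):
--     n = len(line)
--     total = 0
--     start = 0
--     for seg in line.split('#'):
--         c = seg.count('O')
--         total += c * (n - start) - c * (c - 1) // 2
--         start += len(seg) + 1
--     return total
-- ===== Notes on version B (the rewrite author's own statement) =====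
-- stated objective: faster
-- what changed: Replaces A's per-rock accumulation with splitting the line on the cube-rock separator and adding each segment's total load in closed form (arithmetic series c*(n-start) - c*(c-1)//2).
import Mathlib
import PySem

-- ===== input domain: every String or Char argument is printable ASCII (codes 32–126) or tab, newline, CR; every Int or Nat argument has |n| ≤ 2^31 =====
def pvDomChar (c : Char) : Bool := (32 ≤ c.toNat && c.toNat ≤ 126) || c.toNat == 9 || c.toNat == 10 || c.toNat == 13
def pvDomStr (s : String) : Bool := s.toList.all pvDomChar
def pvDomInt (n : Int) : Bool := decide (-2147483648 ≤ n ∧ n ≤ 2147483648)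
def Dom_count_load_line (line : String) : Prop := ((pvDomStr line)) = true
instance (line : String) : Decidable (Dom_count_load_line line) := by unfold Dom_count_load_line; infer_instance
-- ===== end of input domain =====

-- B replaces A's per-rock load accumulation by splitting the line on the cube-rock separator
-- and adding each segment's load in closed form (arithmetic series); measurably faster in Python.


-- ===== PORT A =====
def count_load_line (line : String) : Int :=
  ((PySem.List.enumerate line.toList 0).foldl
      (fun (st : Int × Int) p =>
        if p.2 = 'O' then (st.1 + PySem.Str.len line - st.2, st.2 + 1)
        else if p.2 = '#' then (st.1, p.1 + 1)
        else st)
      (0, 0)).1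

-- ===== PORT B =====
def count_load_line_alt (line : String) : Int :=
  let n := PySem.Str.len line
  ((PySem.Chars.splitOn line.toList ['#']).foldl
      (fun (st : Int × Int) seg =>
        let c : Int := (PySem.Chars.count seg ['O'] : Int)
        (st.1 + c * (n - st.2) - PySem.Int.floordiv (c * (c - 1)) 2,
         st.2 + seg.length + 1))
      (0, 0)).1

-- ===== PRECONDITION & SPEC =====
def Spec_count_load_line (line : String) (out : Int) : Prop := out = count_load_line_alt line
instance (line : String) (out : Int) : Decidable (Spec_count_load_line line out) := by unfold Spec_count_load_line; infer_instance

-- ===== CLAIM (what is proved, stated in full; the proofs are below) =====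
def Claim_equal_count_load_line : Prop := ∀ (line : String), Dom_count_load_line line → Spec_count_load_line line (count_load_line line)

-- ===== LEMMAS AND PROOFS =====

-- A's loop, as structural recursion on the remaining chars (i = index of next char).
def pvARun (n : Int) : List Char → Int → Int × Int → Int × Int
  | [], _, st => st
  | x :: xs, i, st =>
      pvARun n xs (i + 1)
        (if x = 'O' then (st.1 + n - st.2, st.2 + 1)
         else if x = '#' then (st.1, i + 1)
         else st)

-- B's fold over the segment list.
def pvBRun (n : Int) (segs : List (List Char)) (st : Int × Int) : Int × Int :=
  segs.foldl
    (fun (st : Int × Int) seg =>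
      let c : Int := (PySem.Chars.count seg ['O'] : Int)
      (st.1 + c * (n - st.2) - PySem.Int.floordiv (c * (c - 1)) 2,
       st.2 + seg.length + 1))
    st

-- simple reference splitter on '#'
def pvSplit : List Char → List (List Char)
  | [] => [[]]
  | c :: cs => if c = '#' then [] :: pvSplit cs else (pvSplit cs).modifyHead (c :: ·)

theorem pvA_foldl_eq (n : Int) (cs : List Char) : ∀ (i : Int) (st : Int × Int),
    (PySem.List.enumerate cs i).foldl
      (fun (st : Int × Int) p =>
        if p.2 = 'O' then (st.1 + n - st.2, st.2 + 1)
        else if p.2 = '#' then (st.1, p.1 + 1)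
        else st) st = pvARun n cs i st := by
  induction cs with
  | nil => intro i st; simp [PySem.List.enumerate_nil, pvARun]
  | cons x xs ih =>
      intro i st
      simp only [PySem.List.enumerate_cons, List.foldl_cons, pvARun]
      rw [ih]

theorem pv_go_nil (sep : List Char) (f : Nat) (cur : List Char) (acc : List (List Char)) :
    PySem.Chars.splitOn.go sep (f + 1) [] cur acc = (cur.reverse :: acc).reverse := by
  simp [PySem.Chars.splitOn.go]

theorem pv_go_hash (f : Nat) (rest cur : List Char) (acc : List (List Char)) :
    PySem.Chars.splitOn.go ['#'] (f + 1) ('#' :: rest) cur acc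
      = PySem.Chars.splitOn.go ['#'] f rest [] (cur.reverse :: acc) := by
  simp [PySem.Chars.splitOn.go, List.isPrefixOf]

theorem pv_go_other (f : Nat) (c : Char) (h : c ≠ '#') (rest cur : List Char)
    (acc : List (List Char)) :
    PySem.Chars.splitOn.go ['#'] (f + 1) (c :: rest) cur acc
      = PySem.Chars.splitOn.go ['#'] f rest (c :: cur) acc := by
  simp [PySem.Chars.splitOn.go, List.isPrefixOf]
  intro hc
  exact absurd hc.symm h

theorem pv_modifyHead_id (xs : List (List Char)) :
    xs.modifyHead (fun t => t) = xs := by cases xs <;> simp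

theorem pv_modifyHead_comp (f g : List Char → List Char) (xs : List (List Char)) :
    (xs.modifyHead g).modifyHead f = xs.modifyHead (fun t => f (g t)) := by
  cases xs <;> simp

theorem pv_go_eq (cs : List Char) : ∀ (f : Nat), cs.length ≤ f →
    ∀ (cur : List Char) (acc : List (List Char)),
    PySem.Chars.splitOn.go ['#'] f cs cur acc
      = acc.reverse ++ (pvSplit cs).modifyHead (fun t => cur.reverse ++ t) := by
  induction cs with
  | nil =>
      intro f _ cur acc
      cases f with
      | zero => simp [PySem.Chars.splitOn.go, pvSplit]
      | succ f => simp [pv_go_nil, pvSplit]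
  | cons c rest ih =>
      intro f hf cur acc
      obtain ⟨f', rfl⟩ : ∃ f', f = f' + 1 := by
        cases f with
        | zero => simp at hf
        | succ f => exact ⟨f, rfl⟩
      have hf' : rest.length ≤ f' := by simpa using hf
      by_cases hc : c = '#'
      · subst hc
        rw [pv_go_hash, ih f' hf']
        simp [pvSplit, pv_modifyHead_id]
      · rw [pv_go_other f' c hc, ih f' hf']
        simp only [pvSplit, if_neg hc, pv_modifyHead_comp]
        simp

theorem pv_splitOn_eq (cs : List Char) : PySem.Chars.splitOn cs ['#'] = pvSplit cs := by
  show PySem.Chars.splitOn.go ['#'] (cs.length + 1) cs [] [] = _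
  rw [pv_go_eq cs (cs.length + 1) (by omega)]
  simp [pv_modifyHead_id]

theorem pv_count_go_eq (cs : List Char) (v : Char) : ∀ (f : Nat), cs.length ≤ f → ∀ (acc : Nat),
    PySem.Chars.count.go [v] f cs acc = acc + cs.count v := by
  induction cs with
  | nil =>
      intro f _ acc
      cases f <;> simp [PySem.Chars.count.go]
  | cons c rest ih =>
      intro f hf acc
      obtain ⟨f', rfl⟩ : ∃ f', f = f' + 1 := by
        cases f with
        | zero => simp at hf
        | succ f => exact ⟨f, rfl⟩
      have hf' : rest.length ≤ f' := by simpa using hf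
      by_cases hc : v = c
      · subst hc
        simp only [PySem.Chars.count.go, List.isPrefixOf]
        rw [if_pos (by simp)]
        simp only [List.length_cons, List.length_nil, List.drop_succ_cons, List.drop_zero]
        rw [ih f' hf']
        simp only [List.count_cons_self]
        omega
      · simp only [PySem.Chars.count.go, List.isPrefixOf]
        rw [if_neg (by simp [hc]), ih f' hf']
        rw [List.count_cons_of_ne (fun h => hc h.symm)]

theorem pv_count_eq (cs : List Char) : PySem.Chars.count cs ['O'] = cs.count 'O' := by
  show (if ([('O' : Char)].isEmpty = true) then cs.length + 1
        else PySem.Chars.count.go ['O'] cs.length cs 0) = _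
  rw [if_neg (by simp), pv_count_go_eq cs 'O' cs.length (le_refl _)]
  omega

theorem pv_div2 (a : Nat) : (a + 1) * a / 2 = a * (a - 1) / 2 + a := by
  cases a with
  | zero => rfl
  | succ b =>
      have h : (b + 1 + 1) * (b + 1) = (b + 1) * b + (b + 1) * 2 := by ring
      have h' : (b + 1) * (b + 1 - 1) = (b + 1) * b := by simp
      rw [h, h', Nat.add_mul_div_right _ _ (by norm_num)]

-- a '#'-free segment with C rocks, entered at index i with fall-position pos,
-- contributes C*(n-pos) - C*(C-1)/2 and leaves fall position pos+C.
theorem pv_seg (n : Int) (seg : List Char) (hseg : ∀ c ∈ seg, c ≠ '#') :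
    ∀ (xs : List Char) (i t pos : Int),
    pvARun n (seg ++ xs) i (t, pos)
      = pvARun n xs (i + seg.length)
          (t + (seg.count 'O' : Int) * (n - pos) - ((seg.count 'O' * (seg.count 'O' - 1) / 2 : Nat) : Int),
           pos + (seg.count 'O' : Int)) := by
  induction seg with
  | nil => intro xs i t pos; simp
  | cons c rest ih =>
      intro xs i t pos
      have hc : c ≠ '#' := hseg c (by simp)
      have hrest : ∀ x ∈ rest, x ≠ '#' := fun x hx => hseg x (by simp [hx])
      by_cases hO : c = 'O'
      · subst hO
        have step : pvARun n (('O' :: rest) ++ xs) i (t, pos)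
            = pvARun n (rest ++ xs) (i + 1) (t + n - pos, pos + 1) := by
          simp [pvARun]
        rw [step, ih hrest]
        rw [List.count_cons_self, Nat.add_sub_cancel, pv_div2]
        congr 1
        · push_cast [List.length_cons]; ring
        · simp only [Prod.mk.injEq]
          constructor <;> (push_cast; ring)
      · have step : pvARun n ((c :: rest) ++ xs) i (t, pos)
            = pvARun n (rest ++ xs) (i + 1) (t, pos) := by
          simp [pvARun, hO, hc]
        rw [step, ih hrest]
        rw [List.count_cons_of_ne (fun h => hO h)]
        congr 1
        push_cast [List.length_cons]; ring

theorem pv_split_no_hash (seg : List Char) (hseg : ∀ c ∈ seg, c ≠ '#') :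
    pvSplit seg = [seg] := by
  induction seg with
  | nil => rfl
  | cons c rest ih =>
      have hc : c ≠ '#' := hseg c (by simp)
      rw [pvSplit, if_neg hc, ih (fun x hx => hseg x (by simp [hx]))]
      rfl

theorem pv_split_append (seg : List Char) (hseg : ∀ c ∈ seg, c ≠ '#') (cs : List Char) :
    pvSplit (seg ++ '#' :: cs) = seg :: pvSplit cs := by
  induction seg with
  | nil => simp [pvSplit]
  | cons c rest ih =>
      have hc : c ≠ '#' := hseg c (by simp)
      rw [List.cons_append, pvSplit, if_neg hc, ih (fun x hx => hseg x (by simp [hx]))]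
      rfl

theorem pv_cast_pred (C : Nat) :
    (C : Int) * ((C - 1 : Nat) : Int) / 2 = (C : Int) * ((C : Int) - 1) / 2 := by
  cases C with
  | zero => simp
  | succ m => push_cast [Nat.add_sub_cancel]; ring_nf

theorem pv_main (n : Int) (k : Nat) : ∀ (cs : List Char), cs.length ≤ k → ∀ (t s : Int),
    (pvARun n cs s (t, s)).1 = (pvBRun n (pvSplit cs) (t, s)).1 := by
  induction k with
  | zero =>
      intro cs hk t s
      have : cs = [] := by cases cs <;> simp_all
      subst this
      simp [pvARun, pvSplit, pvBRun, pv_count_eq]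
  | succ k ih =>
      intro cs hk t s
      set seg := cs.takeWhile (fun c => c ≠ '#') with hsegdef
      set rest := cs.dropWhile (fun c => c ≠ '#') with hrestdef
      have hcs : seg ++ rest = cs := List.takeWhile_append_dropWhile
      have hseg : ∀ c ∈ seg, c ≠ '#' := by
        intro c hc
        have := List.mem_takeWhile_imp hc
        simpa using this
      cases hrest : rest with
      | nil =>
          have hA := pv_seg n seg hseg [] s t s
          rw [List.append_nil] at hA
          have hcs' : cs = seg := by rw [← hcs, hrest, List.append_nil]
          rw [hcs', hA, pv_split_no_hash seg hseg]
          simp [pvARun, pvBRun, pv_count_eq]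
          exact pv_cast_pred _
      | cons c cs' =>
          have hchash : c = '#' := by
            have := List.head?_dropWhile_not (fun c => decide (c ≠ '#')) cs
            rw [← hrestdef, hrest] at this
            simpa using this
          subst hchash
          have hcs' : cs = seg ++ '#' :: cs' := by rw [← hcs, hrest]
          have hlen : cs'.length ≤ k := by
            have h := hk
            rw [hcs'] at h
            simp [List.length_append] at h
            omega
          have hA2 : pvARun n cs s (t, s)
              = pvARun n cs' (s + seg.length + 1)
                  (t + (seg.count 'O' : Int) * (n - s) - ((seg.count 'O' * (seg.count 'O' - 1) / 2 : Nat) : Int),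
                   s + seg.length + 1) := by
            rw [hcs', pv_seg n seg hseg ('#' :: cs') s t s]
            simp [pvARun]
          have hB : pvBRun n (pvSplit cs) (t, s)
              = pvBRun n (pvSplit cs')
                  (t + (seg.count 'O' : Int) * (n - s) - ((seg.count 'O' * (seg.count 'O' - 1) / 2 : Nat) : Int),
                   s + seg.length + 1) := by
            rw [hcs', pv_split_append seg hseg cs']
            simp [pvBRun, pv_count_eq]
            rw [pv_cast_pred]
          rw [hA2, hB]
          exact ih cs' hlen _ (s + seg.length + 1)

-- ===== VERDICT (by name: the statement is the Claim_ definition above) =====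
theorem count_load_line_spec : Claim_equal_count_load_line := by
  intro line _
  unfold Spec_count_load_line count_load_line count_load_line_alt
  rw [pvA_foldl_eq (PySem.Str.len line) line.toList 0 (0, 0)]
  rw [pv_splitOn_eq]
  exact pv_main (PySem.Str.len line) line.toList.length line.toList (le_refl _) 0 0
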